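-- pv_equiv track=rewrite | github.com/hubmapconsortium/atac-data-products | make_uuids_tsv.py | extract_donor_metadata
-- ===== SOURCE A (Python) =====
-- def extract_donor_metadata(metadata):
--     donor_info = {
--         "age": None,
--         "sex": None,
--         "height": None,
--         "weight": None,
--         "bmi": None,
--         "cause_of_death": None,
--         "race": None
--     }
--
--     for item in metadata.get('organ_donor_data', []):
--         concept = item.get('grouping_concept_preferred_term')
--         value = item.get('data_value')
--         if concept == "Age":
--             donor_info["age"] = value
--         elif concept == "Sex":
--             donor_info["sex"] = item.get('preferred_term')
--         elif concept == "Height":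
--             donor_info["height"] = value
--         elif concept == "Weight":
--             donor_info["weight"] = value
--         elif concept == "Body mass index":
--             donor_info["bmi"] = value
--         elif concept == "Cause of death":
--             donor_info["cause_of_death"] = item.get('preferred_term')
--         elif concept == "Race":
--             donor_info["race"] = item.get('preferred_term')
--
--     for item in metadata.get('living_donor_data', []):
--         concept = item.get('grouping_concept_preferred_term')
--         value = item.get('data_value')
--         if concept == "Age":
--             donor_info["age"] = value
--         elif concept == "Sex":
--             donor_info["sex"] = item.get('preferred_term')
--         elif concept == "Height":
--             donor_info["height"] = value
--         elif concept == "Weight":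
--             donor_info["weight"] = value
--         elif concept == "Body mass index":
--             donor_info["bmi"] = value
--         elif concept == "Cause of death":
--             donor_info["cause_of_death"] = item.get('preferred_term')
--         elif concept == "Race":
--             donor_info["race"] = item.get('preferred_term')
--
--     return donor_info
-- ===== SOURCE B (Python) =====
-- # Per-field last-match search: each of the seven fields is computed independently
-- # by scanning the combined donor list back-to-front for the first matching concept,
-- # instead of one forward pass mutating a dict through an if/elif chain.
--
-- _FIELDS = [
--     ("age", "Age", "data_value"),
--     ("sex", "Sex", "preferred_term"),
--     ("height", "Height", "data_value"),
--     ("weight", "Weight", "data_value"),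
--     ("bmi", "Body mass index", "data_value"),
--     ("cause_of_death", "Cause of death", "preferred_term"),
--     ("race", "Race", "preferred_term"),
-- ]
--
-- def _last_match(combined, concept, source_field):
--     for item in reversed(combined):
--         if item.get('grouping_concept_preferred_term') == concept:
--             return item.get(source_field)
--     return None
--
-- def extract_donor_metadata(metadata):
--     combined = metadata.get('organ_donor_data', []) + metadata.get('living_donor_data', [])
--     return {key: _last_match(combined, concept, src) for key, concept, src in _FIELDS}
-- ===== Notes on version B (the rewrite author's own statement) =====
-- stated objective: alternative
-- what changed: Replaces A's single forward pass mutating a 7-key dict through a duplicated if/elif chain with seven independent backward scans of the concatenated donor lists, each field computed as the last item matching its concept (last match forward = first match in reverse).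
import Mathlib
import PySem

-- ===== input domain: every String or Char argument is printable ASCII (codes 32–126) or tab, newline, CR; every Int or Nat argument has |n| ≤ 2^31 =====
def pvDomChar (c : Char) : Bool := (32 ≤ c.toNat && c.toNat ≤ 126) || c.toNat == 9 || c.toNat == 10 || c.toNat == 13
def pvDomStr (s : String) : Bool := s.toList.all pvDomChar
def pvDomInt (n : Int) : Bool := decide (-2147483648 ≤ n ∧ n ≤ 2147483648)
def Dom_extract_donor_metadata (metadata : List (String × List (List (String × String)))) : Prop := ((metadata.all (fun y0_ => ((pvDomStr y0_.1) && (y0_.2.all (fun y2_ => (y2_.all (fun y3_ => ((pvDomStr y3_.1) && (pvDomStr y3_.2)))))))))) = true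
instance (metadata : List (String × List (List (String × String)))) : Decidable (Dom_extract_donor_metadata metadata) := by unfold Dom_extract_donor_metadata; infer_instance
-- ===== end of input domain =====

-- B computes each of the seven fields independently by a backward scan of the
-- concatenated donor lists (last matching concept wins), instead of A's single
-- forward pass mutating a dict through a duplicated if/elif chain (alternative).

-- ===== PORT A =====
-- item.get(k) on a dict given as an association list: first-match lookup
def pvItemGet (item : List (String × String)) (k : String) : Option String :=
  (PySem.Dict.mk item).get? k

-- the body of A's (identical) two for-loops
def pvStepA (d : PySem.Dict String (Option String)) (item : List (String × String)) :
    PySem.Dict String (Option String) :=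
  let concept := pvItemGet item "grouping_concept_preferred_term"
  let value := pvItemGet item "data_value"
  if concept = some "Age" then d.insert "age" value
  else if concept = some "Sex" then d.insert "sex" (pvItemGet item "preferred_term")
  else if concept = some "Height" then d.insert "height" value
  else if concept = some "Weight" then d.insert "weight" value
  else if concept = some "Body mass index" then d.insert "bmi" value
  else if concept = some "Cause of death" then d.insert "cause_of_death" (pvItemGet item "preferred_term")
  else if concept = some "Race" then d.insert "race" (pvItemGet item "preferred_term")
  else d

def extract_donor_metadata (metadata : List (String × List (List (String × String)))) : List (String × Option String) :=
  let donor_info : PySem.Dict String (Option String) := PySem.Dict.mk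
    [("age", none), ("sex", none), ("height", none), ("weight", none),
     ("bmi", none), ("cause_of_death", none), ("race", none)]
  let d1 := ((PySem.Dict.mk metadata).getD "organ_donor_data" []).foldl pvStepA donor_info
  let d2 := ((PySem.Dict.mk metadata).getD "living_donor_data" []).foldl pvStepA d1
  d2.items

-- ===== PORT B =====
-- _last_match: first item of reversed(combined) whose concept matches, then item.get(src)
def pvLastMatch (combined : List (List (String × String))) (concept src : String) :
    Option String :=
  match combined.reverse.find?
      (fun item => pvItemGet item "grouping_concept_preferred_term" == some concept) with
  | some item => pvItemGet item src
  | none => none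

def pvFields : List (String × String × String) :=
  [("age", "Age", "data_value"), ("sex", "Sex", "preferred_term"),
   ("height", "Height", "data_value"), ("weight", "Weight", "data_value"),
   ("bmi", "Body mass index", "data_value"),
   ("cause_of_death", "Cause of death", "preferred_term"),
   ("race", "Race", "preferred_term")]

def extract_donor_metadata_alt (metadata : List (String × List (List (String × String)))) : List (String × Option String) :=
  let combined := (PySem.Dict.mk metadata).getD "organ_donor_data" [] ++
                  (PySem.Dict.mk metadata).getD "living_donor_data" []
  pvFields.map (fun f => (f.1, pvLastMatch combined f.2.1 f.2.2))

-- ===== PRECONDITION & SPEC =====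
def Spec_extract_donor_metadata (metadata : List (String × List (List (String × String)))) (out : List (String × Option String)) : Prop := out = extract_donor_metadata_alt metadata
instance (metadata : List (String × List (List (String × String)))) (out : List (String × Option String)) : Decidable (Spec_extract_donor_metadata metadata out) := by unfold Spec_extract_donor_metadata; infer_instance

-- ===== CLAIM =====
def Claim_equal_extract_donor_metadata : Prop := ∀ (metadata : List (String × List (List (String × String)))), Dom_extract_donor_metadata metadata → Spec_extract_donor_metadata metadata (extract_donor_metadata metadata)

-- ===== LEMMAS AND PROOFS =====
-- appending one item to the scanned list: it wins iff its concept matches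
theorem pvLastMatch_append_singleton (xs : List (List (String × String)))
    (x : List (String × String)) (c src : String) :
    pvLastMatch (xs ++ [x]) c src =
      if pvItemGet x "grouping_concept_preferred_term" = some c
      then pvItemGet x src else pvLastMatch xs c src := by
  simp only [pvLastMatch, List.reverse_append, List.reverse_singleton, List.singleton_append,
    List.find?_cons]
  by_cases h : pvItemGet x "grouping_concept_preferred_term" = some c
  · rw [if_pos h, show (pvItemGet x "grouping_concept_preferred_term" == some c) = true from beq_iff_eq.mpr h]
  · rw [if_neg h, show (pvItemGet x "grouping_concept_preferred_term" == some c) = false from beq_eq_false_iff_ne.mpr h]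

-- the invariant: A's fold over any item list equals B's seven per-field last-match values
theorem pv_fold_eq (xs : List (List (String × String))) :
    xs.foldl pvStepA (PySem.Dict.mk
      [("age", none), ("sex", none), ("height", none), ("weight", none),
       ("bmi", none), ("cause_of_death", none), ("race", none)]) =
    PySem.Dict.mk
      [("age", pvLastMatch xs "Age" "data_value"),
       ("sex", pvLastMatch xs "Sex" "preferred_term"),
       ("height", pvLastMatch xs "Height" "data_value"),
       ("weight", pvLastMatch xs "Weight" "data_value"),
       ("bmi", pvLastMatch xs "Body mass index" "data_value"),
       ("cause_of_death", pvLastMatch xs "Cause of death" "preferred_term"),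
       ("race", pvLastMatch xs "Race" "preferred_term")] := by
  induction xs using List.reverseRecOn with
  | nil => rfl
  | append_singleton xs x ih =>
    rw [List.foldl_append, List.foldl_cons, List.foldl_nil, ih]
    simp only [pvLastMatch_append_singleton]
    unfold pvStepA
    cases hc : pvItemGet x "grouping_concept_preferred_term" with
    | none => simp
    | some c =>
      by_cases h1 : c = "Age" <;> by_cases h2 : c = "Sex" <;>
        by_cases h3 : c = "Height" <;> by_cases h4 : c = "Weight" <;>
        by_cases h5 : c = "Body mass index" <;> by_cases h6 : c = "Cause of death" <;>
        by_cases h7 : c = "Race" <;>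
        simp_all <;> rfl

-- ===== VERDICT =====
theorem extract_donor_metadata_spec : Claim_equal_extract_donor_metadata := by
  intro metadata _
  show extract_donor_metadata metadata = extract_donor_metadata_alt metadata
  simp only [extract_donor_metadata, extract_donor_metadata_alt]
  rw [← List.foldl_append, pv_fold_eq]
  rfl
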